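-- pv_equiv track=rewrite | github.com/kazuhiko1979/edabit | recursion/上級_データ構造入門_キュー_課題_ジム建設.py | stackCounter
-- ===== SOURCE A (Python) =====
-- def stackCounter(arr):
--     stack = []
--     results = [0] * len(arr)
--     i = 0
--     for x in arr:
--         total = 1
--         while len(stack) != 0 and arr[stack[-1]] >= x:
--             j = stack.pop()
--             total += results[j]
--
--         stack.append(i)
--         results[i] = total
--         i += 1
--
--     return results
-- ===== SOURCE B (Python) =====
-- def stackCounter(arr):
--     results = []
--     for i in range(len(arr)):
--         j = i - 1
--         while j >= 0 and arr[j] >= arr[i]: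
--             j -= 1
--         results.append(i - j)
--     return results
-- ===== Notes on version B (the rewrite author's own statement) =====
-- stated objective: simpler
-- what changed: Replaced the monotonic stack and collapsed-count accumulation by a direct backward scan: results[i] = i - (index of the nearest preceding element strictly smaller than arr[i], or -1), with no stack and no results reuse.
import Mathlib
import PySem

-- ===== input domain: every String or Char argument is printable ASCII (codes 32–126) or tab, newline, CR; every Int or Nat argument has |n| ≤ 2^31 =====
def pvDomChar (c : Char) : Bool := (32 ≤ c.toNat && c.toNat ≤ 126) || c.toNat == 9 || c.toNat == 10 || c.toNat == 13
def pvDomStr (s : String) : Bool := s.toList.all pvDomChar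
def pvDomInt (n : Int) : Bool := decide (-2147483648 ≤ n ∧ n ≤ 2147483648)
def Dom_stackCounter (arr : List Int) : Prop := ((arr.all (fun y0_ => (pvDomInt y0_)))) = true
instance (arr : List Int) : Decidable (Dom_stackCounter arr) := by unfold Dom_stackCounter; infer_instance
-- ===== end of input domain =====

-- B replaces A's monotonic stack by a direct backward scan for the nearest preceding
-- strictly-smaller element (simpler, no stack and no reuse of earlier results).


-- ===== PORT A =====
-- the inner `while` loop: pop indices whose value is ≥ x, accumulating results[j] into total
def popA (arr : List Int) (x : Int) (results : List Int) :
    List Nat → Int → Int × List Nat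
  | [], total => (total, [])
  | j :: rest, total =>
    if x ≤ arr.getD j 0 then popA arr x results rest (total + results.getD j 0)
    else (total, j :: rest)

def stackCounter (arr : List Int) : List Int :=
  (arr.foldl
    (fun (st : List Nat × List Int × Nat) x =>
      match st with
      | (stack, results, i) =>
        let p := popA arr x results stack 1
        (i :: p.2, results.set i p.1, i + 1))
    ([], List.replicate arr.length 0, 0)).2.1

-- ===== PORT B =====
-- the inner `while` loop: scan j = k-1, k-2, … downward while arr[j] ≥ x; returns final j (may be -1)
def scanB (arr : List Int) (x : Int) : Nat → Int
  | 0 => -1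
  | k + 1 => if x ≤ arr.getD k 0 then scanB arr x k else (k : Int)

def stackCounter_alt (arr : List Int) : List Int :=
  (List.range arr.length).map (fun (i : Nat) => (i : Int) - scanB arr (arr.getD i 0) i)

-- ===== PRECONDITION & SPEC =====
def Spec_stackCounter (arr : List Int) (out : List Int) : Prop := out = stackCounter_alt arr
instance (arr : List Int) (out : List Int) : Decidable (Spec_stackCounter arr out) := by unfold Spec_stackCounter; infer_instance

-- ===== CLAIM (what is proved, stated in full; the proofs are below) =====
def Claim_equal_stackCounter : Prop := ∀ (arr : List Int), Dom_stackCounter arr → Spec_stackCounter arr (stackCounter arr)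

-- ===== LEMMAS AND PROOFS =====

-- B's per-index value
def specA (arr : List Int) (k : Nat) : Int := (k : Int) - scanB arr (arr.getD k 0) k

theorem scanB_le (arr : List Int) (x : Int) : ∀ j : Nat, scanB arr x j ≤ (j : Int) - 1 := by
  intro j
  induction j with
  | zero => simp [scanB]
  | succ t ih =>
    simp only [scanB]
    split
    · push_cast; omega
    · push_cast; omega

theorem scanB_ge (arr : List Int) (x : Int) : ∀ j : Nat, -1 ≤ scanB arr x j := by
  intro j
  induction j with
  | zero => simp [scanB]
  | succ t ih =>
    simp only [scanB]
    split
    · exact ih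
    · omega

-- all indices strictly between the scan result and the start have value ≥ x
theorem scanB_skip (arr : List Int) (x : Int) :
    ∀ j k : Nat, scanB arr x j < (k : Int) → k < j → x ≤ arr.getD k 0 := by
  intro j
  induction j with
  | zero => intro k _ h; omega
  | succ t ih =>
    intro k h1 h2
    by_cases hv : x ≤ arr.getD t 0
    · by_cases hk : k = t
      · subst hk; exact hv
      · exact ih k (by simpa only [scanB, if_pos hv] using h1) (by omega)
    · simp only [scanB, if_neg hv] at h1
      omega

-- if every index in [m, j) has value ≥ x, scanning from j equals scanning from m
theorem scanB_congr (arr : List Int) (x : Int) :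
    ∀ j m : Nat, m ≤ j → (∀ k : Nat, m ≤ k → k < j → x ≤ arr.getD k 0) →
    scanB arr x j = scanB arr x m := by
  intro j
  induction j with
  | zero =>
    intro m hm _
    have : m = 0 := by omega
    subst this; rfl
  | succ t ih =>
    intro m hm hall
    by_cases h : m = t + 1
    · subst h; rfl
    · have hmt : m ≤ t := by omega
      have ht : x ≤ arr.getD t 0 := hall t hmt (by omega)
      simp only [scanB, if_pos ht]
      exact ih m hmt (fun k hk1 hk2 => hall k hk1 (by omega))

-- the chain of nearest-smaller indices: exactly the stack A maintains (top first)
def chainS (arr : List Int) (i : Nat) : List Nat :=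
  i :: (if _h : 0 ≤ scanB arr (arr.getD i 0) i
        then chainS arr (scanB arr (arr.getD i 0) i).toNat
        else [])
termination_by i
decreasing_by
  have h2 := scanB_le arr (arr.getD i 0) i
  omega

def optChain (arr : List Int) (q : Int) : List Nat :=
  if 0 ≤ q then chainS arr q.toNat else []

theorem chainS_eq (arr : List Int) (i : Nat) :
    chainS arr i = i :: optChain arr (scanB arr (arr.getD i 0) i) := by
  rw [chainS, optChain]
  split <;> rfl

-- key lemma: A's pop loop on the chain from top j telescopes to B's backward scan
theorem popA_chain (arr : List Int) (x : Int) (res : List Int) :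
    ∀ j : Nat, (∀ k : Nat, k ≤ j → res.getD k 0 = specA arr k) → ∀ acc : Int,
    popA arr x res (chainS arr j) acc =
      (acc + (j : Int) - scanB arr x (j + 1), optChain arr (scanB arr x (j + 1))) := by
  intro j
  induction j using Nat.strong_induction_on with
  | _ j ih =>
    intro hres acc
    rw [chainS_eq]
    by_cases hv : x ≤ arr.getD j 0
    · -- j gets popped
      have hq : scanB arr x (j + 1) = scanB arr x j := by
        simp only [scanB, if_pos hv]
      set p := scanB arr (arr.getD j 0) j with hp
      have hple : p ≤ (j : Int) - 1 := scanB_le arr (arr.getD j 0) j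
      have hskip : ∀ k : Nat, p < (k : Int) → k < j → x ≤ arr.getD k 0 :=
        fun k h1 h2 => le_trans hv (scanB_skip arr (arr.getD j 0) j k h1 h2)
      rw [optChain]
      by_cases h0 : 0 ≤ p
      · -- the stack below j is the chain at p = nearest smaller of arr[j]
        have hlt : p.toNat < j := by omega
        have hqp : scanB arr x j = scanB arr x (p.toNat + 1) :=
          scanB_congr arr x j (p.toNat + 1) (by omega)
            (fun k hk1 hk2 => hskip k (by omega) hk2)
        rw [if_pos h0]
        simp only [popA, if_pos hv, hres j (le_refl j)]
        rw [ih p.toNat hlt (fun k hk => hres k (by omega)) (acc + specA arr j)]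
        rw [hq, hqp]
        refine Prod.ext ?_ rfl
        simp only [specA, ← hp]
        push_cast
        omega
      · -- stack emptied: no element below j is < x
        rw [if_neg h0]
        simp only [popA, if_pos hv, hres j (le_refl j)]
        have hpneg : p ≤ -1 := by omega
        have hq0 : scanB arr x j = -1 := by
          have h1 : scanB arr x j = scanB arr x 0 := by
            refine scanB_congr arr x j 0 (by omega) ?_
            intro k _ hk2
            exact hskip k (by omega) hk2
          simpa [scanB] using h1
        rw [hq, hq0, optChain, if_neg (by norm_num)]
        refine Prod.ext ?_ rfl
        simp only [specA, ← hp]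
        have hp1 : p = -1 := by
          have := scanB_ge arr (arr.getD j 0) j
          omega
        rw [hp1]
        push_cast
        omega
    · -- scan stops immediately at j
      have hq : scanB arr x (j + 1) = (j : Int) := by
        simp only [scanB, if_neg hv]
      have hoc : optChain arr ((j : Nat) : Int)
          = j :: optChain arr (scanB arr (arr.getD j 0) j) := by
        rw [optChain, if_pos (Int.natCast_nonneg j), Int.toNat_natCast, chainS_eq]
      simp only [popA, if_neg hv, hq, hoc]
      refine Prod.ext ?_ rfl
      simp only []
      omega

-- the fold body of A, named so the step lemmas can mention it
def pvBody (arr : List Int) (st : List Nat × List Int × Nat) (x : Int) :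
    List Nat × List Int × Nat :=
  match st with
  | (stack, results, i) =>
    let p := popA arr x results stack 1
    (i :: p.2, results.set i p.1, i + 1)

theorem stackCounter_eq_body (arr : List Int) :
    stackCounter arr
      = (arr.foldl (pvBody arr) ([], List.replicate arr.length 0, 0)).2.1 := rfl

-- the results list after the first i elements have been processed
def resOf (arr : List Int) (i : Nat) : List Int :=
  (List.range arr.length).map (fun j => if j < i then specA arr j else 0)

-- the stack after the first i elements have been processed
def stOf (arr : List Int) : Nat → List Nat
  | 0 => []
  | i + 1 => chainS arr i

theorem resOf_zero (arr : List Int) : resOf arr 0 = List.replicate arr.length 0 := by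
  simp [resOf, List.map_const']

theorem resOf_getD (arr : List Int) (i k : Nat) (hk : k < i) (hn : k < arr.length) :
    (resOf arr i).getD k 0 = specA arr k := by
  rw [resOf, List.getD_eq_getElem?_getD]
  simp [hn, hk]

theorem resOf_set (arr : List Int) (i : Nat) (hi : i < arr.length) :
    (resOf arr i).set i (specA arr i) = resOf arr (i + 1) := by
  apply List.ext_getElem
  · simp [resOf]
  · intro k h1 h2
    have hkn : k < arr.length := by simpa [resOf] using h2
    simp only [resOf, List.getElem_set, List.getElem_map, List.getElem_range]
    by_cases hk : i = k
    · subst hk; simp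
    · rw [if_neg hk]
      by_cases hki : k < i
      · rw [if_pos hki, if_pos (by omega)]
      · rw [if_neg hki, if_neg (by omega)]

-- one step of A's fold advances the invariant state
theorem step_lemma (arr : List Int) (i : Nat) (hi : i < arr.length) :
    pvBody arr (stOf arr i, resOf arr i, i) (arr.getD i 0)
    = (stOf arr (i + 1), resOf arr (i + 1), i + 1) := by
  show (i :: (popA arr (arr.getD i 0) (resOf arr i) (stOf arr i) 1).2,
        (resOf arr i).set i (popA arr (arr.getD i 0) (resOf arr i) (stOf arr i) 1).1,
        i + 1) = _
  cases i with
  | zero =>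
    have hpop : popA arr (arr.getD 0 0) (resOf arr 0) (stOf arr 0) 1 = (1, []) := rfl
    rw [hpop]
    have hspec : specA arr 0 = 1 := by simp [specA, scanB]
    have hst : stOf arr 1 = [0] := by
      show chainS arr 0 = [0]
      rw [chainS_eq]
      have : scanB arr (arr.getD 0 0) 0 = -1 := rfl
      rw [this, optChain, if_neg (by norm_num)]
    rw [hst, ← resOf_set arr 0 hi, hspec]
  | succ i' =>
    have hres : ∀ k : Nat, k ≤ i' → (resOf arr (i' + 1)).getD k 0 = specA arr k :=
      fun k hk => resOf_getD arr (i' + 1) k (by omega) (by omega)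
    have hpop := popA_chain arr (arr.getD (i' + 1) 0) (resOf arr (i' + 1)) i' hres 1
    have hst : stOf arr (i' + 1) = chainS arr i' := rfl
    rw [hst, hpop]
    have htot : (1 : Int) + (i' : Int) - scanB arr (arr.getD (i' + 1) 0) (i' + 1)
        = specA arr (i' + 1) := by
      simp only [specA]
      push_cast
      omega
    have hst2 : stOf arr (i' + 1 + 1) = chainS arr (i' + 1) := rfl
    rw [htot, resOf_set arr (i' + 1) hi, hst2, chainS_eq]

theorem fold_lemma (arr : List Int) :
    ∀ d i : Nat, i + d = arr.length →
    (arr.drop i).foldl (pvBody arr) (stOf arr i, resOf arr i, i)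
    = (stOf arr arr.length, resOf arr arr.length, arr.length) := by
  intro d
  induction d with
  | zero =>
    intro i hi
    have : i = arr.length := by omega
    subst this
    simp
  | succ t ih =>
    intro i hi
    have hlt : i < arr.length := by omega
    rw [List.drop_eq_getElem_cons hlt, List.foldl_cons]
    have hget : arr[i] = arr.getD i 0 := (List.getD_eq_getElem arr 0 hlt).symm
    rw [hget, step_lemma arr i hlt]
    exact ih (i + 1) (by omega)

theorem resOf_length_eq_alt (arr : List Int) : resOf arr arr.length = stackCounter_alt arr := by
  unfold resOf stackCounter_alt
  apply List.map_congr_left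
  intro k hk
  rw [List.mem_range] at hk
  simp [hk, specA]

-- ===== VERDICT (by name: the statement is the Claim_ definition above) =====
theorem stackCounter_spec : Claim_equal_stackCounter := by
  intro arr _
  unfold Spec_stackCounter
  rw [stackCounter_eq_body]
  have h := fold_lemma arr arr.length 0 (by omega)
  rw [List.drop_zero] at h
  rw [show (stOf arr 0) = [] from rfl, resOf_zero] at h
  rw [h, resOf_length_eq_alt]
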